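-- pv_equiv track=rewrite | github.com/vitorpavinato/dosage-sensitive-gene-variants | get_human_variant_effect.py | count_functional_variants
-- ===== SOURCE A (Python) =====
-- def count_functional_variants(variants: list[dict]) -> tuple[int, int, int]:
--     # Initialize the counters
--     intron_count = 0
--     synonymous_count = 0
--     missense_count = 0
--
--     for variant in variants:
--         if variant["consequence_type"] == "missense_variant":
--             missense_count += 1
--         elif variant["consequence_type"] == "synonymous_variant":
--             synonymous_count += 1
--         elif variant["consequence_type"] == "intron_variant":
--             intron_count += 1
--
--     return (intron_count, synonymous_count, missense_count)
-- ===== SOURCE B (Python) =====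
-- def count_functional_variants(variants: list[dict]) -> tuple[int, int, int]:
--     # Project once, then count each category over the projected list.
--     types = [v["consequence_type"] for v in variants]
--     return (
--         types.count("intron_variant"),
--         types.count("synonymous_variant"),
--         types.count("missense_variant"),
--     )
-- ===== Notes on version B (the rewrite author's own statement) =====
-- stated objective: idiomatic
-- what changed: B replaces the per-element if/elif branching with a projection of the consequence types followed by three list.count lookups (aggregate-then-lookup, no in-loop branches).
import Mathlib
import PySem

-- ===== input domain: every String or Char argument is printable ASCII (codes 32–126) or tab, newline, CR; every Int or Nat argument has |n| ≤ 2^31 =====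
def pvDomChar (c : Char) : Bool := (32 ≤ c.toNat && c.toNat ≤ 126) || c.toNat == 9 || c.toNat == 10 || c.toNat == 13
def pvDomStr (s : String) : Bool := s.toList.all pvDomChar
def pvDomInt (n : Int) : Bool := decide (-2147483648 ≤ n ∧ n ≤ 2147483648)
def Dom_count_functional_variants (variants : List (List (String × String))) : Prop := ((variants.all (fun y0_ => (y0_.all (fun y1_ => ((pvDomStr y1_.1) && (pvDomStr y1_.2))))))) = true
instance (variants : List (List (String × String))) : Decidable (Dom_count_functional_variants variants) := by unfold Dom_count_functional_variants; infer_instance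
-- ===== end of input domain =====

-- B replaces A's per-element if/elif branching by a projection of the consequence
-- types followed by three list.count lookups (idiomatic aggregate-then-lookup).


-- ===== PORT A =====
-- literal transliteration: three counters, one loop with if/elif chain on variant["consequence_type"]
def count_functional_variants (variants : List (List (String × String))) : Int × Int × Int :=
  let r := variants.foldl (fun (acc : Int × Int × Int) v =>
    let ct := (PySem.Dict.mk v).get? "consequence_type"
    if ct = some "missense_variant" then (acc.1, acc.2.1, acc.2.2 + 1)
    else if ct = some "synonymous_variant" then (acc.1, acc.2.1 + 1, acc.2.2)
    else if ct = some "intron_variant" then (acc.1 + 1, acc.2.1, acc.2.2)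
    else acc) (0, 0, 0)
  r

-- ===== PORT B =====
-- projection then three counts; the lookup is exact where the key is present (Pre_)
def count_functional_variants_alt (variants : List (List (String × String))) : Int × Int × Int :=
  let types := variants.map (fun v => ((PySem.Dict.mk v).get? "consequence_type").getD "")
  ((types.count "intron_variant" : Int),
   (types.count "synonymous_variant" : Int),
   (types.count "missense_variant" : Int))

-- ===== PRECONDITION & SPEC =====
-- Pre_: every variant dict has the key "consequence_type"; otherwise A (and B) raise KeyError.
def Pre_count_functional_variants (variants : List (List (String × String))) : Prop :=
  (variants.all (fun v => (PySem.Dict.mk v).contains "consequence_type")) = true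
instance (variants : List (List (String × String))) : Decidable (Pre_count_functional_variants variants) := by unfold Pre_count_functional_variants; infer_instance

def pvWitness_count_functional_variants : (List (List (String × String))) :=
  [[("consequence_type", "missense_variant")], [("consequence_type", "intron_variant")]]

def Spec_count_functional_variants (variants : List (List (String × String))) (out : Int × Int × Int) : Prop := out = count_functional_variants_alt variants
instance (variants : List (List (String × String))) (out : Int × Int × Int) : Decidable (Spec_count_functional_variants variants out) := by unfold Spec_count_functional_variants; infer_instance

-- ===== CLAIM (what is proved, stated in full; the proofs are below) =====
def Claim_equal_count_functional_variants : Prop := ∀ (variants : List (List (String × String))), Dom_count_functional_variants variants → Pre_count_functional_variants variants → Spec_count_functional_variants variants (count_functional_variants variants)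

-- ===== LEMMAS AND PROOFS =====

-- loop invariant: A's foldl from any accumulator adds B's three counts componentwise
theorem cfv_foldl_eq (l : List (List (String × String)))
    (h : (l.all (fun v => (PySem.Dict.mk v).contains "consequence_type")) = true) :
    ∀ acc : Int × Int × Int,
      l.foldl (fun (acc : Int × Int × Int) v =>
        let ct := (PySem.Dict.mk v).get? "consequence_type"
        if ct = some "missense_variant" then (acc.1, acc.2.1, acc.2.2 + 1)
        else if ct = some "synonymous_variant" then (acc.1, acc.2.1 + 1, acc.2.2)
        else if ct = some "intron_variant" then (acc.1 + 1, acc.2.1, acc.2.2)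
        else acc) acc
      = (acc.1 + ((l.map (fun v => ((PySem.Dict.mk v).get? "consequence_type").getD "")).count "intron_variant" : Int),
         acc.2.1 + ((l.map (fun v => ((PySem.Dict.mk v).get? "consequence_type").getD "")).count "synonymous_variant" : Int),
         acc.2.2 + ((l.map (fun v => ((PySem.Dict.mk v).get? "consequence_type").getD "")).count "missense_variant" : Int)) := by
  induction l with
  | nil => intro acc; simp
  | cons v rest ih =>
    simp only [List.all_cons, Bool.and_eq_true] at h
    intro acc
    obtain ⟨hv, hrest⟩ := h
    have hsome : ∃ w, (PySem.Dict.mk v).get? "consequence_type" = some w := by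
      cases hg : (PySem.Dict.mk v).get? "consequence_type" with
      | none =>
        exfalso
        have := PySem.Dict.contains_eq_isSome_get? (PySem.Dict.mk v) "consequence_type"
        rw [hg] at this; simp [this] at hv
      | some w => exact ⟨w, rfl⟩
    obtain ⟨w, hw⟩ := hsome
    simp only [List.foldl_cons, List.map_cons, List.count_cons, ih hrest, hw]
    by_cases h1 : w = "missense_variant"
    · subst h1; simp; omega
    · by_cases h2 : w = "synonymous_variant"
      · subst h2; simp [h1]; omega
      · by_cases h3 : w = "intron_variant"
        · subst h3; simp [h1, h2]; omega
        · simp [h1, h2, h3]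

-- ===== VERDICT (by name: the statement is the Claim_ definition above) =====
theorem count_functional_variants_spec : Claim_equal_count_functional_variants := by
  intro variants _ hpre
  unfold Spec_count_functional_variants count_functional_variants count_functional_variants_alt
  simpa using cfv_foldl_eq variants hpre (0, 0, 0)
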